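-- pv_equiv track=rewrite | github.com/DigitalCyberSoft/mysqlpg | mysqlpg/translator.py | _convert_backticks
-- ===== SOURCE A (Python) =====
-- def _convert_backticks(sql):
--     """Replace backtick-quoted identifiers with double-quoted identifiers."""
--     result = []
--     in_single = False
--     in_double = False
--     i = 0
--     while i < len(sql):
--         ch = sql[i]
--         if ch == "'" and not in_double:
--             in_single = not in_single
--             result.append(ch)
--         elif ch == '"' and not in_single:
--             in_double = not in_double
--             result.append(ch)
--         elif ch == '`' and not in_single and not in_double:
--             # Find matching backtick
--             end = sql.find('`', i + 1)
--             if end >= 0: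
--                 identifier = sql[i + 1:end]
--                 result.append('"')
--                 result.append(identifier)
--                 result.append('"')
--                 i = end
--             else:
--                 result.append(ch)
--         else:
--             result.append(ch)
--         i += 1
--     return "".join(result)
-- ===== SOURCE B (Python) =====
-- def _convert_backticks(sql):
--     """Replace backtick-quoted identifiers with double-quoted identifiers.
--
--     Tokenizer: consumes whole quoted runs at once (an unclosed quote swallows
--     the rest), converts closed backtick runs, copies everything else."""
--     out = []
--     i = 0
--     n = len(sql)
--     while i < n:
--         c = sql[i]
--         if c == "'" or c == '"':
--             j = sql.find(c, i + 1)
--             if j < 0: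
--                 out.append(sql[i:])
--                 break
--             out.append(sql[i:j + 1])
--             i = j + 1
--         elif c == '`':
--             j = sql.find('`', i + 1)
--             if j < 0:
--                 out.append(c)
--                 i += 1
--             else:
--                 out.append('"' + sql[i + 1:j] + '"')
--                 i = j + 1
--         else:
--             out.append(c)
--             i += 1
--     return "".join(out)
-- ===== Notes on version B (the rewrite author's own statement) =====
-- stated objective: alternative
-- what changed: Replaced A's char-by-char scan with in_single/in_double boolean state flags by a stateless tokenizer that consumes each quoted run in one jump (find the matching close quote, or swallow the rest if unclosed) and converts closed backtick runs in one step.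
import Mathlib
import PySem

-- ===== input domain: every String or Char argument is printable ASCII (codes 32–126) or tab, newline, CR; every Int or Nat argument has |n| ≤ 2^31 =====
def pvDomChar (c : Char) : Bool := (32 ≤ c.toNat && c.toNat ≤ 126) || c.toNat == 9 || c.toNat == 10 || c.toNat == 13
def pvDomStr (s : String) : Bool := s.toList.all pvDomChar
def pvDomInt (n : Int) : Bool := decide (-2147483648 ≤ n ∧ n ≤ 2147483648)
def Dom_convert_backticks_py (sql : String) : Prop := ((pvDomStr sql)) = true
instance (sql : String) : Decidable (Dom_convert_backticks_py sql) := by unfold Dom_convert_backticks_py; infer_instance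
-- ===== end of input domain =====

-- B replaces A's char-by-char quote-state machine by a tokenizer that consumes whole
-- quoted runs at once (objective: simpler / alternative; no speed claim).

-- ===== PORT A =====
-- A's while loop over index i with in_single/in_double flags, ported as recursion on the
-- remaining suffix of characters; sql.find('`', i+1) becomes PySem.List.index? on the
-- suffix, sql[i+1:end] its take, and the jump i = end (+1) its drop.
def convert_backticks_py_go : List Char → Bool → Bool → List Char
  | [], _, _ => []
  | ch :: rest, inS, inD =>
    if ch = '\'' ∧ inD = false then
      ch :: convert_backticks_py_go rest (!inS) inD
    else if ch = '"' ∧ inS = false then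
      ch :: convert_backticks_py_go rest inS (!inD)
    else if ch = '`' ∧ inS = false ∧ inD = false then
      match PySem.List.index? rest '`' with
      | some k =>
          '"' :: rest.take k ++ '"' :: convert_backticks_py_go (rest.drop (k + 1)) inS inD
      | none => ch :: convert_backticks_py_go rest inS inD
    else ch :: convert_backticks_py_go rest inS inD
termination_by l _ _ => l.length
decreasing_by
  · simp
  · simp
  · simp only [List.length_cons, List.length_drop]; omega
  · simp
  · simp

def convert_backticks_py (sql : String) : String :=
  String.mk (convert_backticks_py_go sql.toList false false)

-- ===== PORT B =====
-- B's token loop: a quote consumes up to its matching close (or the rest if unclosed),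
-- a backtick with a close becomes a double-quoted identifier, anything else is copied.
def convert_backticks_py_alt_go : List Char → List Char
  | [] => []
  | c :: rest =>
    if c = '\'' ∨ c = '"' then
      if h : rest.dropWhile (· ≠ c) = [] then
        c :: rest.takeWhile (· ≠ c)
      else
        c :: rest.takeWhile (· ≠ c) ++ c :: convert_backticks_py_alt_go (rest.dropWhile (· ≠ c)).tail
    else if c = '`' then
      if h : rest.dropWhile (· ≠ '`') = [] then
        c :: convert_backticks_py_alt_go rest
      else
        '"' :: rest.takeWhile (· ≠ '`') ++ '"' :: convert_backticks_py_alt_go (rest.dropWhile (· ≠ '`')).tail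
    else c :: convert_backticks_py_alt_go rest
termination_by l => l.length
decreasing_by
  · have hle := List.length_dropWhile_le (fun x => decide (x ≠ c)) rest
    have hpos : 0 < (rest.dropWhile (· ≠ c)).length := List.length_pos_of_ne_nil h
    simp only [List.length_tail, List.length_cons]
    omega
  · simp
  · have hle := List.length_dropWhile_le (fun x => decide (x ≠ '`')) rest
    have hpos : 0 < (rest.dropWhile (· ≠ '`')).length := List.length_pos_of_ne_nil h
    simp only [List.length_tail, List.length_cons]
    omega
  · simp

def convert_backticks_py_alt (sql : String) : String :=
  String.mk (convert_backticks_py_alt_go sql.toList)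

-- ===== PRECONDITION & SPEC =====
def Spec_convert_backticks_py (sql : String) (out : String) : Prop := out = convert_backticks_py_alt sql
instance (sql : String) (out : String) : Decidable (Spec_convert_backticks_py sql out) := by unfold Spec_convert_backticks_py; infer_instance

-- ===== CLAIM (what is proved, stated in full; the proofs are below) =====
def Claim_equal_convert_backticks_py : Prop := ∀ (sql : String), Dom_convert_backticks_py sql → Spec_convert_backticks_py sql (convert_backticks_py sql)

-- ===== LEMMAS AND PROOFS =====

-- A inside a single-quoted run copies every char literally until the closing quote.
theorem aGo_single (l : List Char) :
    convert_backticks_py_go l true false =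
      l.takeWhile (· ≠ '\'') ++
        (match l.dropWhile (· ≠ '\'') with
         | [] => []
         | _ :: r => '\'' :: convert_backticks_py_go r false false) := by
  induction l with
  | nil => simp [convert_backticks_py_go]
  | cons c rest ih =>
    by_cases hc : c = '\''
    · subst hc
      simp [convert_backticks_py_go, List.takeWhile_cons, List.dropWhile_cons]
    · rw [convert_backticks_py_go]
      simp [hc, List.takeWhile_cons, List.dropWhile_cons, ih]

-- A inside a double-quoted run copies every char literally until the closing quote.
theorem aGo_double (l : List Char) :
    convert_backticks_py_go l false true =
      l.takeWhile (· ≠ '"') ++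
        (match l.dropWhile (· ≠ '"') with
         | [] => []
         | _ :: r => '"' :: convert_backticks_py_go r false false) := by
  induction l with
  | nil => simp [convert_backticks_py_go]
  | cons c rest ih =>
    by_cases hc : c = '"'
    · subst hc
      simp [convert_backticks_py_go, List.takeWhile_cons, List.dropWhile_cons]
    · rw [convert_backticks_py_go]
      simp [hc, List.takeWhile_cons, List.dropWhile_cons, ih]

-- index? versus takeWhile/dropWhile: the found index splits the list at the first hit.
theorem index?_take_drop {l : List Char} {a : Char} {k : ℕ}
    (h : PySem.List.index? l a = some k) :
    l.take k = l.takeWhile (· ≠ a) ∧ l.drop (k + 1) = (l.dropWhile (· ≠ a)).tail := by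
  induction l generalizing k with
  | nil => simp [PySem.List.index?_eq_idxOf?, List.idxOf?] at h
  | cons c rest ih =>
    by_cases hc : c = a
    · subst hc
      rw [PySem.List.index?_cons_self] at h
      cases h
      simp [List.takeWhile_cons, List.dropWhile_cons]
    · rw [PySem.List.index?_cons_of_ne rest hc] at h
      cases hk : PySem.List.index? rest a with
      | none => rw [hk] at h; simp at h
      | some k' =>
        rw [hk] at h; simp at h
        obtain ⟨t, d⟩ := ih hk
        subst h
        simp [List.takeWhile_cons, List.dropWhile_cons, hc, t, d]

theorem index?_none_drop {l : List Char} {a : Char}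
    (h : PySem.List.index? l a = none) : l.dropWhile (· ≠ a) = [] := by
  rw [PySem.List.index?_eq_none_iff] at h
  exact List.dropWhile_eq_nil_iff.mpr (by intro x hx; simp; rintro rfl; exact h hx)

-- Main equivalence of the two loops, by strong induction on length.
theorem go_eq (n : ℕ) (l : List Char) (hl : l.length ≤ n) :
    convert_backticks_py_go l false false = convert_backticks_py_alt_go l := by
  induction n generalizing l with
  | zero =>
    have h0 : l = [] := by cases l <;> simp_all
    subst h0
    rw [convert_backticks_py_go, convert_backticks_py_alt_go]
  | succ n ih =>
    cases l with
    | nil => rw [convert_backticks_py_go, convert_backticks_py_alt_go]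
    | cons c rest =>
      have hrest : rest.length ≤ n := by simp at hl; omega
      have hdw : ∀ (p : Char → Bool) (x : Char) (r : List Char),
          rest.dropWhile p = x :: r → r.length ≤ n := by
        intro p x r hd
        have hle := List.length_dropWhile_le p rest
        rw [hd] at hle; simp at hle; omega
      by_cases h1 : c = '\''
      · subst h1
        rw [convert_backticks_py_go, convert_backticks_py_alt_go]
        cases hd : rest.dropWhile (· ≠ '\'') with
        | nil => simp only [ne_eq, decide_not] at hd; simp [aGo_single, hd]
        | cons x r =>
          have hn := ih r (hdw _ x r hd)
          simp only [ne_eq, decide_not] at hd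
          simp [aGo_single, hd, hn]
      · by_cases h2 : c = '"'
        · subst h2
          rw [convert_backticks_py_go, convert_backticks_py_alt_go]
          cases hd : rest.dropWhile (· ≠ '"') with
          | nil => simp only [ne_eq, decide_not] at hd; simp [aGo_double, hd]
          | cons x r =>
            have hn := ih r (hdw _ x r hd)
            simp only [ne_eq, decide_not] at hd
            simp [aGo_double, hd, hn]
        · by_cases h3 : c = '`'
          · subst h3
            rw [convert_backticks_py_go, convert_backticks_py_alt_go]
            cases hk : PySem.List.index? rest '`' with
            | some k =>
              obtain ⟨t, d⟩ := index?_take_drop hk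
              cases hd : rest.dropWhile (· ≠ '`') with
              | nil =>
                exfalso
                have hall := List.dropWhile_eq_nil_iff.mp hd
                have hnone : PySem.List.index? rest '`' = none :=
                  Iff.mpr (PySem.List.index?_eq_none_iff rest '`') (fun hmem => by simpa using hall _ hmem)
                rw [hk] at hnone
                cases hnone
              | cons x r =>
                have hr : rest.drop (k + 1) = r := by rw [d, hd]; rfl
                have hn := ih r (hdw _ x r hd)
                simp only [ne_eq, decide_not] at hd t
                simp [hk, hd, t, hr, hn]
            | none =>
              have hd : rest.dropWhile (· ≠ '`') = [] := index?_none_drop hk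
              have hn := ih rest hrest
              simp only [ne_eq, decide_not] at hd
              simp [hk, hd, hn]
          · rw [convert_backticks_py_go, convert_backticks_py_alt_go]
            simp [h1, h2, h3, ih rest hrest]

-- ===== VERDICT (by name: the statement is the Claim_ definition above) =====
theorem convert_backticks_py_spec : Claim_equal_convert_backticks_py := by
  intro sql _
  unfold Spec_convert_backticks_py convert_backticks_py convert_backticks_py_alt
  rw [go_eq sql.toList.length sql.toList le_rfl]
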